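-- pv_equiv track=rewrite | github.com/jr0612/proyecto-programacion-1 | lugares_y_nombres.py | frec_personajes
-- ===== SOURCE A (Python) =====
-- def frec_personajes(personajes, texto):
--     palabras = texto.split()
--     frec={}
--     frec_final={}
--     for palabra in palabras:
--         if palabra in personajes:
--             f= frec.get(palabra, 0)
--             frec[palabra] = f+1
--
--
--     for key in frec.keys():
--         f = frec.get(key)
--         key = quitar_simbolos_no_alpha(key)
--         if key not in frec_final:
--             frec_final[key] = f
--         else:
--             frec_final[key] += f
--
--     return frec_final
--
-- def quitar_simbolos_no_alpha(pal):
--     while not pal[-1].isalpha():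
--         if len(pal) ==1 : return ''
--         else:
--             pal = pal[:-1]
--     return pal
-- ===== SOURCE B (Python) =====
-- def frec_personajes(personajes, texto):
--     frec_final = {}
--     for palabra in texto.split():
--         if palabra in personajes:
--             clave = quitar_simbolos_no_alpha(palabra)
--             frec_final[clave] = frec_final.get(clave, 0) + 1
--     return frec_final
--
-- def quitar_simbolos_no_alpha(pal):
--     while not pal[-1].isalpha():
--         if len(pal) ==1 : return ''
--         else:
--             pal = pal[:-1]
--     return pal
-- ===== Notes on version B (the rewrite author's own statement) =====
-- stated objective: simpler
-- what changed: Single pass over the words incrementing the stripped key directly, dropping A's intermediate raw-word frequency dict and its second merge loop.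
import Mathlib
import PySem

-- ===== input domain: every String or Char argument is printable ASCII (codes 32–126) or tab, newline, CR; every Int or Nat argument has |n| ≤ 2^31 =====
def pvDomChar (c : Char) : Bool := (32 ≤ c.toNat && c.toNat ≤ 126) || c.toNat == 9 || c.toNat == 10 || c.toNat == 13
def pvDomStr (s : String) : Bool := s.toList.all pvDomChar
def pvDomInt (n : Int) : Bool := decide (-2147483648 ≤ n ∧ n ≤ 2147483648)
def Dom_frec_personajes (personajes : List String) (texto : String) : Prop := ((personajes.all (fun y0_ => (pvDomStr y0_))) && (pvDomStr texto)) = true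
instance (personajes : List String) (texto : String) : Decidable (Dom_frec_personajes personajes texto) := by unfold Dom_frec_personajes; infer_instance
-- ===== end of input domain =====

-- B merges A's two loops into one pass that counts directly under the stripped key (objective: simpler).

-- ===== PORT A =====
-- helper quitar_simbolos_no_alpha: the while loop strips characters from the RIGHT, so it is
-- recursion on the reversed character list; the [] case is unreachable from frec_personajes
-- (split₀ produces only non-empty words; on "" Python would raise IndexError).
def quitarAux : List Char → List Char
  | [] => []
  | c :: rest => if PySem.Chars.isalpha c then c :: rest else quitarAux rest

def quitar_simbolos_no_alpha (pal : String) : String :=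
  String.ofList (quitarAux pal.toList.reverse).reverse

def frec_personajes (personajes : List String) (texto : String) : List (String × Int) :=
  let palabras := PySem.Str.split₀ texto
  let frec : PySem.Dict String Int :=
    palabras.foldl
      (fun frec palabra =>
        if personajes.contains palabra then
          frec.insert palabra (frec.getD palabra 0 + 1)  -- f = frec.get(palabra, 0); frec[palabra] = f+1
        else frec)
      PySem.Dict.empty
  -- for key in frec.keys(): f = frec.get(key)  (key ∈ frec, so the lookup yields its value: getD 0)
  let frec_final : PySem.Dict String Int :=
    frec.keys.foldl
      (fun frec_final key =>
        let f := frec.getD key 0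
        let key := quitar_simbolos_no_alpha key
        if !frec_final.contains key then frec_final.insert key f
        else frec_final.modify key 0 (· + f))
      PySem.Dict.empty
  frec_final.items

-- ===== PORT B =====
def frec_personajes_alt (personajes : List String) (texto : String) : List (String × Int) :=
  ((PySem.Str.split₀ texto).foldl
      (fun frec_final palabra =>
        if personajes.contains palabra then
          let clave := quitar_simbolos_no_alpha palabra
          frec_final.insert clave (frec_final.getD clave 0 + 1)
        else frec_final)
      (PySem.Dict.empty : PySem.Dict String Int)).items

-- ===== PRECONDITION & SPEC =====
def Spec_frec_personajes (personajes : List String) (texto : String) (out : List (String × Int)) : Prop := out = frec_personajes_alt personajes texto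
instance (personajes : List String) (texto : String) (out : List (String × Int)) : Decidable (Spec_frec_personajes personajes texto out) := by unfold Spec_frec_personajes; infer_instance

-- ===== CLAIM (what is proved, stated in full; the proofs are below) =====
def Claim_equal_frec_personajes : Prop := ∀ (personajes : List String) (texto : String), Dom_frec_personajes personajes texto → Spec_frec_personajes personajes texto (frec_personajes personajes texto)

-- ===== LEMMAS AND PROOFS =====

-- A's second loop, in item-pair form: add the pair's count under the stripped key.
def pvStep2 (d : PySem.Dict String Int) (p : String × Int) : PySem.Dict String Int :=
  if !d.contains (quitar_simbolos_no_alpha p.1) then d.insert (quitar_simbolos_no_alpha p.1) p.2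
  else d.modify (quitar_simbolos_no_alpha p.1) 0 (· + p.2)

theorem pvModify_eq_insert (d : PySem.Dict String Int) (k : String) (d0 : Int) (f : Int → Int) :
    d.modify k d0 f = d.insert k (f (d.getD k d0)) := rfl

theorem pvStep2_contains (d : PySem.Dict String Int) (p : String × Int) (k : String)
    (h : d.contains k = true) : (pvStep2 d p).contains k = true := by
  unfold pvStep2
  split <;> simp [PySem.Dict.contains_insert, PySem.Dict.contains_modify, h]

theorem pvInsert_comm (d : PySem.Dict String Int) (k k' : String) (a b : Int)
    (hne : k ≠ k') (hk : d.contains k = true) :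
    (d.insert k a).insert k' b = (d.insert k' b).insert k a := by
  apply PySem.Dict.ext
  by_cases hk' : d.contains k' = true
  · rw [PySem.Dict.items_insert_of_contains _ b
          (by simp [PySem.Dict.contains_insert, hk']),
        PySem.Dict.items_insert_of_contains _ a hk,
        PySem.Dict.items_insert_of_contains _ a
          (by simp [PySem.Dict.contains_insert, hk]),
        PySem.Dict.items_insert_of_contains _ b hk']
    simp only [List.map_map]
    congr 1
    funext p
    simp only [Function.comp]
    by_cases h1 : p.1 = k' <;> by_cases h2 : p.1 = k <;>
      simp_all [Ne.symm hne]
  · rw [Bool.not_eq_true] at hk'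
    rw [PySem.Dict.items_insert_of_not_contains _ b
          (by simp [PySem.Dict.contains_insert, hk', Ne.symm hne]),
        PySem.Dict.items_insert_of_contains _ a hk,
        PySem.Dict.items_insert_of_contains _ a
          (by simp [PySem.Dict.contains_insert, hk]),
        PySem.Dict.items_insert_of_not_contains _ b hk']
    simp [Ne.symm hne]

theorem pvStepA (d : PySem.Dict String Int) (w : String) (v : Int) :
    pvStep2 d (w, v + 1) = (pvStep2 d (w, v)).modify (quitar_simbolos_no_alpha w) 0 (· + 1) := by
  unfold pvStep2
  by_cases hc : d.contains (quitar_simbolos_no_alpha w) = true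
  · rw [hc]
    simp only [Bool.not_true, Bool.false_eq_true, if_false, pvModify_eq_insert,
      PySem.Dict.getD_insert_self, PySem.Dict.insert_insert_self]
    congr 1
    ring
  · rw [Bool.not_eq_true] at hc
    rw [hc]
    simp only [Bool.not_false, if_true, pvModify_eq_insert,
      PySem.Dict.getD_insert_self, PySem.Dict.insert_insert_self]

theorem pvStepC (d : PySem.Dict String Int) (p : String × Int) (k : String)
    (h : d.contains k = true) :
    pvStep2 (d.modify k 0 (· + 1)) p = (pvStep2 d p).modify k 0 (· + 1) := by
  unfold pvStep2
  by_cases hk : quitar_simbolos_no_alpha p.1 = k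
  · rw [hk]
    simp only [pvModify_eq_insert, PySem.Dict.contains_insert, BEq.rfl, Bool.true_or,
      Bool.not_true, Bool.false_eq_true, if_false, h,
      PySem.Dict.getD_insert_self, PySem.Dict.insert_insert_self]
    congr 1
    ring
  · have hne : k ≠ quitar_simbolos_no_alpha p.1 := fun hh => hk (Eq.symm hh)
    by_cases hc : d.contains (quitar_simbolos_no_alpha p.1) = true
    · simp only [pvModify_eq_insert, PySem.Dict.contains_insert, hc, Bool.or_true,
        Bool.not_true, Bool.false_eq_true, if_false,
        PySem.Dict.getD_insert_of_ne _ _ _ hk, PySem.Dict.getD_insert_of_ne _ _ _ hne]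
      exact pvInsert_comm d k _ _ _ hne h
    · rw [Bool.not_eq_true] at hc
      have hbeq : (quitar_simbolos_no_alpha p.1 == k) = false := by
        simp [hk]
      simp only [pvModify_eq_insert, PySem.Dict.contains_insert, hc, hbeq,
        Bool.or_false, Bool.not_false, if_true,
        PySem.Dict.getD_insert_of_ne _ _ _ hk, PySem.Dict.getD_insert_of_ne _ _ _ hne]
      exact pvInsert_comm d k _ _ _ hne h

theorem pvCommute (l : List (String × Int)) (d : PySem.Dict String Int) (k : String)
    (h : d.contains k = true) :
    l.foldl pvStep2 (d.modify k 0 (· + 1)) = (l.foldl pvStep2 d).modify k 0 (· + 1) := by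
  induction l generalizing d with
  | nil => rfl
  | cons p l ih =>
      simp only [List.foldl_cons, pvStepC d p k h]
      exact ih _ (pvStep2_contains d p k h)

theorem pvStep2_one (d : PySem.Dict String Int) (w : String) :
    pvStep2 d (w, 0 + 1) = d.modify (quitar_simbolos_no_alpha w) 0 (· + 1) := by
  unfold pvStep2
  by_cases hc : d.contains (quitar_simbolos_no_alpha w) = true
  · rw [hc]
    simp only [Bool.not_true, Bool.false_eq_true, if_false, pvModify_eq_insert]
    norm_num
  · rw [Bool.not_eq_true] at hc
    rw [hc]
    simp only [Bool.not_false, if_true, pvModify_eq_insert,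
      PySem.Dict.getD_of_not_contains _ _ hc]

theorem pvStep2_contains_self (d : PySem.Dict String Int) (w : String) (v : Int) :
    (pvStep2 d (w, v)).contains (quitar_simbolos_no_alpha w) = true := by
  unfold pvStep2
  split <;>
    simp [pvModify_eq_insert]

theorem pvMaster (ws : List String) :
    (PySem.Dict.counter ws).items.foldl pvStep2 PySem.Dict.empty
      = PySem.Dict.counter (ws.map quitar_simbolos_no_alpha) := by
  induction ws using List.reverseRecOn with
  | nil => rfl
  | append_singleton ws w ih =>
    rw [List.map_append, List.map_cons, List.map_nil,
      PySem.Dict.counter_append_singleton, PySem.Dict.counter_append_singleton]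
    by_cases hw : (PySem.Dict.counter ws).contains w = true
    · -- w already counted: its entry sits somewhere in the middle of the items list
      obtain ⟨v, hv⟩ : ∃ v, (PySem.Dict.counter ws).get? w = some v := by
        cases hq : (PySem.Dict.counter ws).get? w with
        | none => rw [(PySem.Dict.get?_eq_none_iff_contains _ _).mp hq] at hw; exact absurd hw (by simp)
        | some v => exact ⟨v, rfl⟩
      obtain ⟨l1, l2, hsplit⟩ := List.append_of_mem (PySem.Dict.mem_items_of_get?_eq_some _ hv)
      have hnd0 : ((l1 ++ (w, v) :: l2).map Prod.fst).Nodup := by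
        have hnd := PySem.Dict.nodup_keys_counter (κ := String) ws
        simp only [PySem.Dict.keys] at hnd
        rw [hsplit] at hnd
        exact hnd
      rw [List.map_append, List.map_cons] at hnd0
      have h1 : ∀ p ∈ l1, p.1 ≠ w := by
        intro p hp heq
        have hm : p.1 ∈ l1.map Prod.fst := List.mem_map_of_mem (f := Prod.fst) hp
        rw [heq] at hm
        exact (List.disjoint_of_nodup_append hnd0) hm List.mem_cons_self
      have h2 : ∀ p ∈ l2, p.1 ≠ w := by
        intro p hp heq
        have hm : p.1 ∈ l2.map Prod.fst := List.mem_map_of_mem (f := Prod.fst) hp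
        rw [heq] at hm
        exact (List.nodup_cons.mp (hnd0.of_append_right)).1 hm
      have hvv : (PySem.Dict.counter ws).getD w 0 = v :=
        PySem.Dict.getD_of_get?_eq_some _ _ hv
      rw [pvModify_eq_insert, hvv, PySem.Dict.items_insert_of_contains _ _ hw, hsplit]
      have hrepl : (l1 ++ (w, v) :: l2).map
          (fun p => if (p.1 == w) = true then (w, v + 1) else p) = l1 ++ (w, v + 1) :: l2 := by
        rw [List.map_append, List.map_cons]
        congr 1
        · exact List.map_congr_left (fun p hp => by simp [h1 p hp]) |>.trans (List.map_id l1)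
        · congr 1
          · simp
          · exact List.map_congr_left (fun p hp => by simp [h2 p hp]) |>.trans (List.map_id l2)
      rw [hrepl, List.foldl_append, List.foldl_cons, pvStepA,
        pvCommute l2 _ _ (pvStep2_contains_self _ w v), ← List.foldl_cons, ← List.foldl_append,
        ← hsplit, ih]
    · rw [Bool.not_eq_true] at hw
      rw [pvModify_eq_insert, PySem.Dict.getD_of_not_contains _ _ hw,
        PySem.Dict.items_insert_of_not_contains _ _ hw, List.foldl_append, List.foldl_cons,
        List.foldl_nil, ih, pvStep2_one]

theorem pvKeysFold (dct : PySem.Dict String Int) (hnd : dct.keys.Nodup) :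
    dct.keys.foldl
        (fun ff key =>
          if !ff.contains (quitar_simbolos_no_alpha key) then
            ff.insert (quitar_simbolos_no_alpha key) (dct.getD key 0)
          else ff.modify (quitar_simbolos_no_alpha key) 0 (· + dct.getD key 0))
        PySem.Dict.empty
      = dct.items.foldl pvStep2 PySem.Dict.empty := by
  rw [PySem.Dict.items_eq_map_keys dct hnd 0, List.foldl_map]
  rfl

-- ===== VERDICT (by name: the statement is the Claim_ definition above) =====
theorem frec_personajes_spec : Claim_equal_frec_personajes := by
  intro personajes texto _
  show frec_personajes personajes texto = frec_personajes_alt personajes texto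
  unfold frec_personajes frec_personajes_alt
  dsimp only
  have hA1 : (PySem.Str.split₀ texto).foldl
      (fun frec palabra =>
        if personajes.contains palabra = true then
          frec.insert palabra (frec.getD palabra 0 + 1)
        else frec) PySem.Dict.empty
      = PySem.Dict.counter ((PySem.Str.split₀ texto).filter personajes.contains) := by
    rw [← PySem.Dict.foldl_insert_getD_add_one_eq_counter, List.foldl_filter]
  have hB1 : (PySem.Str.split₀ texto).foldl
      (fun ff palabra =>
        if personajes.contains palabra = true then
          ff.insert (quitar_simbolos_no_alpha palabra)
            (ff.getD (quitar_simbolos_no_alpha palabra) 0 + 1)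
        else ff) PySem.Dict.empty
      = PySem.Dict.counter
          (((PySem.Str.split₀ texto).filter personajes.contains).map quitar_simbolos_no_alpha) := by
    rw [← PySem.Dict.foldl_insert_getD_add_one_eq_counter, List.foldl_map, List.foldl_filter]
  rw [hA1, hB1, pvKeysFold _ (PySem.Dict.nodup_keys_counter _), pvMaster]
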